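-- pv_equiv track=rewrite | github.com/gtrivedi88/content-editorial-assistant | rules/language_and_grammar/prefixes_rule.py | _has_difficult_letter_combination
-- ===== SOURCE A (Python) =====
-- def _has_difficult_letter_combination(prefix: str, base_word: str) -> bool:
--     """Check if prefix + base creates difficult letter combinations."""
--     # Check for doubled consonants or difficult combinations
--     combined = prefix + base_word
--
--     # Difficult combinations that might benefit from hyphens
--     difficult_patterns = [
--         'oo', 'ee', 'aa', 'ii', 'uu',  # Doubled vowels
--         'll', 'mm', 'nn', 'pp', 'ss', 'tt',  # Doubled consonants
--     ]
--
--     junction = prefix[-1:] + base_word[:1] if base_word else ''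
--
--     return any(pattern in junction for pattern in difficult_patterns)
-- ===== SOURCE B (Python) =====
-- def _has_difficult_letter_combination(prefix: str, base_word: str) -> bool:
--     """Check if prefix + base creates difficult letter combinations."""
--     # Every difficult pattern is a doubled letter, and the junction has at most
--     # two characters, so it suffices to compare the two junction characters.
--     last = prefix[-1:]
--     first = base_word[:1]
--     return last != '' and last == first and last in {'a', 'e', 'i', 'o', 'u', 'l', 'm', 'n', 'p', 's', 't'}
-- ===== Notes on version B (the rewrite author's own statement) =====
-- stated objective: simpler
-- what changed: B drops the pattern list and the substring scan entirely: it compares the prefix's last character with the base word's first character and tests membership of that single character in the 11-letter set.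
import Mathlib
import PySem

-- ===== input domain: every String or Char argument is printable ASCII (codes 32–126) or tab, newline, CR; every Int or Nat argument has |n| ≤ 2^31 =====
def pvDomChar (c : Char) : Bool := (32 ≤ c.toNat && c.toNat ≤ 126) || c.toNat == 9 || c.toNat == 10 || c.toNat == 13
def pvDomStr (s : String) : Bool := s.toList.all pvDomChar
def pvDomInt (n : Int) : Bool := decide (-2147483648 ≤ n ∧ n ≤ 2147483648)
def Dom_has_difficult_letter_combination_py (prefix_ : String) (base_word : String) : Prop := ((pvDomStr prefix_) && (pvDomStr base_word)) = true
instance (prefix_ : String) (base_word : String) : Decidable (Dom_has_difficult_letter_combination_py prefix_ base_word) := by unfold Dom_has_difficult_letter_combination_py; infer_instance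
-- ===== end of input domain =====

-- B replaces A's 11-pattern substring scan by a direct comparison of the two junction characters (objective: simpler).

-- ===== PORT A =====
def pvDifficultPatterns : List (List Char) :=
  [['o','o'], ['e','e'], ['a','a'], ['i','i'], ['u','u'],
   ['l','l'], ['m','m'], ['n','n'], ['p','p'], ['s','s'], ['t','t']]

def has_difficult_letter_combination_py (prefix_ : String) (base_word : String) : Bool :=
  -- combined = prefix + base_word  (computed by A but never used)
  let junction : List Char :=
    if base_word.toList ≠ [] then
      PySem.List.slice prefix_.toList (some (-1)) none ++
        PySem.List.slice base_word.toList none (some 1)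
    else []
  pvDifficultPatterns.any (fun pattern => PySem.Chars.isIn pattern junction)

-- ===== PORT B =====
def pvLetterSet : List (List Char) :=
  [['a'], ['e'], ['i'], ['o'], ['u'], ['l'], ['m'], ['n'], ['p'], ['s'], ['t']]

def has_difficult_letter_combination_py_alt (prefix_ : String) (base_word : String) : Bool :=
  let last := PySem.List.slice prefix_.toList (some (-1)) none
  let first := PySem.List.slice base_word.toList none (some 1)
  decide (last ≠ []) && last == first && pvLetterSet.contains last

-- ===== PRECONDITION & SPEC =====
def Spec_has_difficult_letter_combination_py (prefix_ : String) (base_word : String) (out : Bool) : Prop := out = has_difficult_letter_combination_py_alt prefix_ base_word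
instance (prefix_ : String) (base_word : String) (out : Bool) : Decidable (Spec_has_difficult_letter_combination_py prefix_ base_word out) := by unfold Spec_has_difficult_letter_combination_py; infer_instance

-- ===== CLAIM (what is proved, stated in full; the proofs are below) =====
def Claim_equal_has_difficult_letter_combination_py : Prop := ∀ (prefix_ : String) (base_word : String), Dom_has_difficult_letter_combination_py prefix_ base_word → Spec_has_difficult_letter_combination_py prefix_ base_word (has_difficult_letter_combination_py prefix_ base_word)

-- ===== LEMMAS AND PROOFS =====

lemma infix_pair {α : Type} (a b p c : α) : [a, b] <:+: [p, c] ↔ a = p ∧ b = c := by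
  constructor
  · rintro ⟨s, t, h⟩
    have hl := congrArg List.length h
    simp at hl
    have hs : s = [] := List.eq_nil_of_length_eq_zero (by omega)
    have ht : t = [] := List.eq_nil_of_length_eq_zero (by omega)
    subst hs ht
    simp at h
    exact ⟨h.1, h.2⟩
  · rintro ⟨rfl, rfl⟩
    exact List.infix_refl _

lemma isIn_false_of_not_infix (sub s : List Char) (h : ¬ sub <:+: s) :
    PySem.Chars.isIn sub s = false :=
  (PySem.Chars.isIn_eq_false_iff sub s).mpr h

lemma isIn_true_of_infix (sub s : List Char) (h : sub <:+: s) :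
    PySem.Chars.isIn sub s = true := by
  cases hi : PySem.Chars.isIn sub s
  · exact absurd h ((PySem.Chars.isIn_eq_false_iff sub s).mp hi)
  · rfl

lemma isIn_pair (a b p c : Char) :
    PySem.Chars.isIn [a, b] [p, c] = (decide (a = p) && decide (b = c)) := by
  by_cases h1 : a = p <;> by_cases h2 : b = c
  · subst h1 h2
    simp [isIn_true_of_infix _ _ (List.infix_refl _)]
  · rw [isIn_false_of_not_infix _ _ (by rw [infix_pair]; tauto)]; simp [h2]
  · rw [isIn_false_of_not_infix _ _ (by rw [infix_pair]; tauto)]; simp [h1]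
  · rw [isIn_false_of_not_infix _ _ (by rw [infix_pair]; tauto)]; simp [h1]

lemma drop_len_sub_one_concat {α : Type} (ys : List α) (p : α) :
    (ys ++ [p]).drop ((ys ++ [p]).length - 1) = [p] := by
  simp

-- ===== VERDICT (by name: the statement is the Claim_ definition above) =====
set_option maxHeartbeats 1000000 in
theorem has_difficult_letter_combination_py_spec : Claim_equal_has_difficult_letter_combination_py := by
  intro prefix_ base_word _
  unfold Spec_has_difficult_letter_combination_py
  unfold has_difficult_letter_combination_py has_difficult_letter_combination_py_alt
  have hslice : PySem.List.slice base_word.toList none (some (1 : Int)) = base_word.toList.take 1 := by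
    rw [PySem.List.slice_to] <;> norm_num
  rw [PySem.List.slice_from_neg_one, hslice]
  rcases base_word.toList.eq_nil_or_concat' with hb | ⟨ws, w, hb⟩ <;> rw [hb]
  · -- base_word empty: A's junction is empty, B's first is empty
    have hf : ∀ pat : List Char, pat ≠ [] → PySem.Chars.isIn pat [] = false := by
      intro pat hp
      exact isIn_false_of_not_infix _ _ (fun h => hp (List.infix_nil.mp h))
    cases hdrop : prefix_.toList.drop (prefix_.toList.length - 1) <;>
      simp [pvDifficultPatterns, hf]
  · obtain ⟨c, hw⟩ : ∃ c : Char, (ws ++ [w]).take 1 = [c] := by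
      rcases ws with _ | ⟨y, ys⟩ <;> exact ⟨_, rfl⟩
    rw [hw]
    rcases prefix_.toList.eq_nil_or_concat' with hp | ⟨ys, p, hp⟩ <;> rw [hp]
    · -- prefix empty: junction is a single char, no 2-char pattern fits
      have hf : ∀ (a b : Char), PySem.Chars.isIn [a, b] [c] = false := by
        intro a b
        refine isIn_false_of_not_infix _ _ (fun h => ?_)
        have := h.length_le
        simp at this
      simp [pvDifficultPatterns, hf]
    · rw [drop_len_sub_one_concat]
      simp [pvDifficultPatterns, pvLetterSet, isIn_pair]
      rw [Bool.eq_iff_iff]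
      simp only [Bool.or_eq_true, Bool.and_eq_true, decide_eq_true_eq, beq_iff_eq]
      constructor
      · rintro (⟨rfl, h2⟩ | ⟨rfl, h2⟩ | ⟨rfl, h2⟩ | ⟨rfl, h2⟩ | ⟨rfl, h2⟩ | ⟨rfl, h2⟩ |
          ⟨rfl, h2⟩ | ⟨rfl, h2⟩ | ⟨rfl, h2⟩ | ⟨rfl, h2⟩ | ⟨rfl, h2⟩) <;>
          exact ⟨h2, by decide⟩
      · rintro ⟨h1, (rfl | rfl | rfl | rfl | rfl | rfl | rfl | rfl | rfl | rfl | rfl)⟩ <;>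
          subst h1 <;> decide
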